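-- pv_equiv track=rewrite | github.com/yujin0719/Algorithm | 프로그래머스/lv3.최고의 집합.py | solution
-- ===== SOURCE A (Python) =====
-- def solution(n, s):
--     if n > s:
--         return [-1]
--     portion,remain = s // n , s % n
--     answer = [portion] * n
--     for idx in range(remain):
--         answer[idx] += 1
--     return  sorted(answer)
-- ===== SOURCE B (Python) =====
-- def solution(n, s):
--     if n > s:
--         return [-1]
--     out = []
--     while n > 0:
--         q = -(-s // n)   # ceiling of the remaining average = largest remaining element
--         out.append(q)
--         s -= q
--         n -= 1
--     out.reverse()
--     return out
-- ===== Notes on version B (the rewrite author's own statement) =====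
-- stated objective: alternative
-- what changed: B is a greedy loop: it repeatedly takes the ceiling of the remaining average as the largest remaining element, decrements n and subtracts it from s, then reverses the collected list - no divmod of the whole sum, no block replication, no per-index increment pass and no sort.
import Mathlib
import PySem

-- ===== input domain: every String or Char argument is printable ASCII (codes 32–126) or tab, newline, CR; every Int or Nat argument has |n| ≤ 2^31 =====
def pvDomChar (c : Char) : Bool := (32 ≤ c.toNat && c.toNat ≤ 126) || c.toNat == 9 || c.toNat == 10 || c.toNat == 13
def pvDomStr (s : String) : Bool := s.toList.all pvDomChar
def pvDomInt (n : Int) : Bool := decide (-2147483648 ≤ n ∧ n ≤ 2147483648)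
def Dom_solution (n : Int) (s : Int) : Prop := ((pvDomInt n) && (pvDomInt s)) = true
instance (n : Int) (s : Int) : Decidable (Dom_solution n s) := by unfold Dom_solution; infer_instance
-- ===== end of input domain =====

-- B replaces A's divmod/replicate/increment/sort pipeline with a greedy loop that peels
-- off the largest remaining element (ceiling of the remaining average) and reverses at the
-- end (objective: alternative).

-- ===== PORT A =====
def solution (n : Int) (s : Int) : List Int :=
  if n > s then [-1]
  else
    let portion := PySem.Int.floordiv s n
    let remain := PySem.Int.mod s n
    let answer := PySem.List.pyRepeat [portion] n
    let answer := (PySem.List.pyRange 0 remain 1).foldl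
      (fun acc idx => PySem.List.pySetD acc idx (PySem.List.pyGetD acc idx 0 + 1)) answer
    PySem.List.sorted answer (fun x => x) false

-- ===== PORT B =====
-- the while-loop of Source B: state (n, s, out); appends q = -(-s // n) each turn
def solAltLoop (n : Int) (s : Int) (out : List Int) : List Int :=
  if _h : n > 0 then
    let q := -(PySem.Int.floordiv (-s) n)
    solAltLoop (n - 1) (s - q) (out ++ [q])
  else out
termination_by n.toNat
decreasing_by omega

def solution_alt (n : Int) (s : Int) : List Int :=
  if n > s then [-1]
  else (solAltLoop n s []).reverse

-- ===== PRECONDITION & SPEC =====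
-- Pre_ excludes exactly n = 0 with n ≤ s (i.e. 0 ≤ s), where A's 's // n' raises ZeroDivisionError.
def Pre_solution (n : Int) (s : Int) : Prop := n ≠ 0 ∨ s < n
instance (n : Int) (s : Int) : Decidable (Pre_solution n s) := by unfold Pre_solution; infer_instance
def pvWitness_solution : Int × Int := (2, 5)

def Spec_solution (n : Int) (s : Int) (out : List Int) : Prop := out = solution_alt n s
instance (n : Int) (s : Int) (out : List Int) : Decidable (Spec_solution n s out) := by
  unfold Spec_solution; infer_instance

-- ===== CLAIM (what is proved, stated in full; the proofs are below) =====
def Claim_equal_solution : Prop :=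
  ∀ (n : Int) (s : Int), Dom_solution n s → Pre_solution n s → Spec_solution n s (solution n s)
-- ===== LEMMAS AND PROOFS =====

-- A-side: setting index k of (k copies of a, then one or more b's) turns the first b into an a
lemma set_rep (a b : Int) (k r : Nat) :
    (List.replicate k a ++ List.replicate (r+1) b).set k a
      = List.replicate (k+1) a ++ List.replicate r b := by
  rw [List.set_append]
  simp only [List.length_replicate, lt_irrefl, if_false, Nat.sub_self,
    List.replicate_succ, List.set_cons_zero]
  induction k with
  | zero => simp
  | succ k ih => simp [List.replicate_succ, ih]

lemma get_rep (a b : Int) (k r : Nat) :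
    (List.replicate k a ++ List.replicate (r+1) b).getD k 0 = b := by
  rw [List.getD_eq_getElem?_getD, List.getElem?_append_right (by simp)]
  simp [List.replicate_succ]

-- A-side loop invariant: after k iterations the first k entries are incremented
lemma loop_rep (p : Int) (m k : Nat) (hk : k ≤ m) :
    (PySem.List.pyRange 0 (k : Int) 1).foldl
      (fun acc idx => PySem.List.pySetD acc idx (PySem.List.pyGetD acc idx 0 + 1))
      (List.replicate m p)
      = List.replicate k (p+1) ++ List.replicate (m-k) p := by
  induction k with
  | zero => simp [PySem.List.pyRange_one_eq_nil]
  | succ k ih =>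
      rw [show ((k+1:Nat):Int) = (k:Int)+1 by push_cast; ring,
        PySem.List.pyRange_one_succ_right (by positivity), List.foldl_append,
        ih (by omega)]
      have hrw : m - k = (m - (k+1)) + 1 := by omega
      simp only [List.foldl_cons, List.foldl_nil, hrw]
      rw [PySem.List.pySetD_natCast]
      have hget : PySem.List.pyGetD
          (List.replicate k (p+1) ++ List.replicate (m-(k+1)+1) p) (k:Int) 0 = p := by
        rw [PySem.List.pyGetD_natCast]
        exact get_rep (p+1) p k (m-(k+1))
      rw [hget, set_rep]

-- B-side loop characterisation: starting from m*p + r with 0 ≤ r and (r < m or m = 0 ∧ r = 0),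
-- the loop appends r copies of p+1 followed by m - r copies of p.
lemma loopB (m : Nat) : ∀ (p r : Int) (out : List Int), 0 ≤ r → (r < m ∨ (m = 0 ∧ r = 0)) →
    solAltLoop (m : Int) ((m : Int) * p + r) out
      = out ++ List.replicate r.toNat (p+1) ++ List.replicate (m - r.toNat) p := by
  induction m with
  | zero =>
      intro p r out hr0 hcase
      have hr : r = 0 := by omega
      rw [solAltLoop]
      simp [hr]
  | succ m ih =>
      intro p r out hr0 hcase
      have hm1 : (0:Int) < ((m+1 : Nat) : Int) := by positivity
      rw [solAltLoop]
      simp only [dif_pos hm1]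
      by_cases hr : r = 0
      · -- q = p; remaining sum m*p
        have hq : -(PySem.Int.floordiv (-(((m+1:Nat):Int) * p + r)) ((m+1:Nat):Int)) = p := by
          rw [PySem.Int.neg_floordiv_neg_eq_iff_of_pos hm1]
          constructor <;> nlinarith
        rw [hq]
        have harg : ((m+1:Nat):Int) * p + r - p = (m:Int) * p + 0 := by push_cast; ring_nf; omega
        have hn1 : ((m+1:Nat):Int) - 1 = (m:Nat) := by push_cast; ring
        rw [harg, hn1, ih p 0 (out ++ [p]) le_rfl (by omega)]
        subst hr
        simp [List.replicate_succ, List.append_assoc]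
      · -- r > 0 : q = p+1; remaining sum m*p + (r-1)
        have hrpos : 0 < r := lt_of_le_of_ne hr0 (Ne.symm hr)
        have hrm : r < (m+1 : Nat) := by omega
        have hq : -(PySem.Int.floordiv (-(((m+1:Nat):Int) * p + r)) ((m+1:Nat):Int)) = p + 1 := by
          rw [PySem.Int.neg_floordiv_neg_eq_iff_of_pos hm1]
          constructor <;> nlinarith
        rw [hq]
        have harg : ((m+1:Nat):Int) * p + r - (p+1) = (m:Int) * p + (r-1) := by push_cast; ring
        have hn1 : ((m+1:Nat):Int) - 1 = (m:Nat) := by push_cast; ring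
        have hmpos : 0 < m := by omega
        rw [harg, hn1, ih p (r-1) (out ++ [p+1]) (by omega) (by omega)]
        have h1 : r.toNat = (r-1).toNat + 1 := by omega
        have h2 : m - (r-1).toNat = (m+1) - r.toNat := by omega
        rw [h1, List.replicate_succ, Nat.succ_sub_succ, h2]
        simp [List.append_assoc]

lemma solution_eq_alt : ∀ (n s : Int), (n ≠ 0 ∨ s < n) → solution n s = solution_alt n s := by
  intro n s hpre
  unfold solution solution_alt
  by_cases hgt : n > s
  · simp [hgt]
  · simp only [if_neg hgt]
    have hns : n ≤ s := le_of_not_gt hgt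
    have hn0 : n ≠ 0 := by rcases hpre with h | h; exact h; omega
    set p := PySem.Int.floordiv s n with hp
    set r := PySem.Int.mod s n with hr
    rcases lt_or_gt_of_ne hn0 with hneg | hpos
    · -- n < 0 : both sides are []
      have hb := PySem.Int.mod_neg_bounds s hneg
      have hrep : PySem.List.pyRepeat [p] n = [] := by
        rw [PySem.List.pyRepeat_singleton]
        simp [Int.toNat_of_nonpos (le_of_lt hneg)]
      rw [hrep, PySem.List.pyRange_one_eq_nil (by omega)]
      rw [solAltLoop]
      simp [PySem.List.sorted, not_lt.mpr (le_of_lt hneg)]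
    · -- n > 0 : A side gives replicate (n-r) p ++ replicate r (p+1); B's loop reversed gives the same
      have hr0 : 0 ≤ r := PySem.Int.mod_nonneg s hpos
      have hrn : r < n := PySem.Int.mod_lt s hpos
      have hsum : n * p + r = s := by
        have := PySem.Int.floordiv_mul_add_mod s n
        rw [← hp, ← hr] at this; linarith
      -- A side
      have hcast_r : r = ((r.toNat : Nat) : Int) := (Int.toNat_of_nonneg hr0).symm
      rw [PySem.List.pyRepeat_singleton, hcast_r,
        loop_rep p n.toNat r.toNat (by omega)]
      rw [PySem.List.sorted_id_eq_of_perm_of_pairwise _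
        (List.replicate (n.toNat - r.toNat) p ++ List.replicate r.toNat (p+1))
        List.perm_append_comm
        (List.pairwise_append.mpr
          ⟨List.pairwise_replicate.mpr (by tauto),
           List.pairwise_replicate.mpr (by tauto),
           by intro x hx y hy; simp at hx hy; omega⟩)]
      -- B side
      have hcast_n : n = ((n.toNat : Nat) : Int) := (Int.toNat_of_nonneg (le_of_lt hpos)).symm
      have hB : solAltLoop n s []
          = [] ++ List.replicate r.toNat (p+1) ++ List.replicate (n.toNat - r.toNat) p := by
        rw [show s = (n:Int) * p + r by omega, hcast_n]
        exact loopB n.toNat p r [] hr0 (by omega)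
      rw [hB]
      simp [List.reverse_append]

-- ===== VERDICT (by name: the statements are the Claim_ definitions above) =====
theorem solution_spec : Claim_equal_solution := by
  intro n s _ hpre
  exact solution_eq_alt n s hpre
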